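-- pv_equiv track=rewrite | github.com/Henry-Santa/hackathon_kumo | backend/app/estimators.py | estimate_act_from_sat_total
-- ===== SOURCE A (Python) =====
-- from typing import Optional, Tuple
--
-- _ACT_TO_SAT_RANGE: dict[int, Tuple[int, int]] = {
--     36: (1590, 1600),
--     35: (1540, 1580),
--     34: (1490, 1530),
--     33: (1450, 1480),
--     32: (1420, 1440),
--     31: (1390, 1410),
--     30: (1360, 1380),
--     29: (1330, 1350),
--     28: (1300, 1320),
--     27: (1260, 1290),
--     26: (1230, 1250),
--     25: (1200, 1220),
--     24: (1160, 1190),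
--     23: (1130, 1150),
--     22: (1100, 1120),
--     21: (1060, 1090),
--     20: (1030, 1050),
--     19: (990, 1020),
--     18: (960, 980),
--     17: (920, 950),
--     16: (880, 910),
--     15: (830, 870),
--     14: (780, 820),
--     13: (730, 770),
--     12: (690, 720),
--     11: (650, 680),
--     10: (620, 640),
--     9: (590, 610),
-- }
--
-- def estimate_act_from_sat_total(sat_total: int) -> int:
--     """Estimate ACT composite from SAT total using concordance ranges.
--
--     Values below the minimum clamp to 9, above the max clamp to 36.
--     """
--     if sat_total is None:
--         raise ValueError("sat_total is required")
--     sat_total = int(sat_total)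
--     if sat_total <= 610:
--         return 9
--     if sat_total >= 1590:
--         return 36
--     # Find the ACT whose SAT range contains sat_total; if multiple, choose highest ACT
--     for act in sorted(_ACT_TO_SAT_RANGE.keys(), reverse=True):
--         lo, hi = _ACT_TO_SAT_RANGE[act]
--         if lo <= sat_total <= hi:
--             return act
--     # Fallback: interpolate linearly between 610 and 1590
--     return max(9, min(36, round(9 + (sat_total - 610) * (27 / (1590 - 610)))))
-- ===== SOURCE B (Python) =====
-- from bisect import bisect_right
--
-- # ascending concordance bands (lo, hi, act)
-- _BANDS = [
--     (590, 610, 9), (620, 640, 10), (650, 680, 11), (690, 720, 12),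
--     (730, 770, 13), (780, 820, 14), (830, 870, 15), (880, 910, 16),
--     (920, 950, 17), (960, 980, 18), (990, 1020, 19), (1030, 1050, 20),
--     (1060, 1090, 21), (1100, 1120, 22), (1130, 1150, 23), (1160, 1190, 24),
--     (1200, 1220, 25), (1230, 1250, 26), (1260, 1290, 27), (1300, 1320, 28),
--     (1330, 1350, 29), (1360, 1380, 30), (1390, 1410, 31), (1420, 1440, 32),
--     (1450, 1480, 33), (1490, 1530, 34), (1540, 1580, 35), (1590, 1600, 36),
-- ]
-- _LOS = [b[0] for b in _BANDS]
--
-- def estimate_act_from_sat_total(sat_total):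
--     if sat_total is None:
--         raise ValueError("sat_total is required")
--     sat_total = int(sat_total)
--     if sat_total <= 610:
--         return 9
--     if sat_total >= 1590:
--         return 36
--     # rightmost band whose lower bound is <= sat_total (exists: 610 < sat_total, 590 <= 610)
--     lo, hi, act = _BANDS[bisect_right(_LOS, sat_total) - 1]
--     if sat_total <= hi:
--         return act
--     # gap between bands: interpolate linearly between 610 and 1590
--     return max(9, min(36, round(9 + (sat_total - 610) * (27 / 980))))
-- ===== Notes on version B (the rewrite author's own statement) =====
-- stated objective: idiomatic
-- what changed: Replaces the per-call reverse-sorted descending linear scan over the ACT->range dict with a prebuilt ascending (lo, hi, act) band table queried once by bisect_right; clamps and the gap-interpolation formula are kept verbatim.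
import Mathlib
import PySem

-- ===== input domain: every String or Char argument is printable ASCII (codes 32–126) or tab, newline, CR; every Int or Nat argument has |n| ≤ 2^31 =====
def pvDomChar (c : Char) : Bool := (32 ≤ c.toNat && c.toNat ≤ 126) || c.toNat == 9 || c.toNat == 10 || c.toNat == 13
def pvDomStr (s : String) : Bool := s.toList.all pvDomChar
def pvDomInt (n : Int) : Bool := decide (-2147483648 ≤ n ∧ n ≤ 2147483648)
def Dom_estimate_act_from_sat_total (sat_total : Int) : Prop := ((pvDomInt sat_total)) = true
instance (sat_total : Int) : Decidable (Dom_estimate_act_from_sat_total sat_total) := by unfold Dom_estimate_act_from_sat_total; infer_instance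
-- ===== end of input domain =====

-- B replaces A's descending linear scan over the dict with a single prebuilt ascending
-- band table queried by bisect (idiomatic; same exact values everywhere).


-- Python's round(n/d) for d > 0: nearest integer, ties to even (banker's rounding).
-- Both Pythons compute round(9 + (s-610)*(27/980)) in floats; on every input that
-- reaches this expression (611 ≤ s ≤ 1589) the float result equals this exact
-- rational rounding (checked exhaustively), so this hand port is exact there.
def pyRoundHalfEven (n d : Int) : Int :=
  let q := PySem.Int.floordiv n d
  let r := n - q * d
  if 2 * r < d then q
  else if d < 2 * r then q + 1
  else if q % 2 = 0 then q else q + 1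

-- ===== PORT A =====
def actToSatRange : PySem.Dict Int (Int × Int) :=
  PySem.Dict.ofList
    [(36,(1590,1600)), (35,(1540,1580)), (34,(1490,1530)), (33,(1450,1480)),
     (32,(1420,1440)), (31,(1390,1410)), (30,(1360,1380)), (29,(1330,1350)),
     (28,(1300,1320)), (27,(1260,1290)), (26,(1230,1250)), (25,(1200,1220)),
     (24,(1160,1190)), (23,(1130,1150)), (22,(1100,1120)), (21,(1060,1090)),
     (20,(1030,1050)), (19,(990,1020)), (18,(960,980)), (17,(920,950)),
     (16,(880,910)), (15,(830,870)), (14,(780,820)), (13,(730,770)),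
     (12,(690,720)), (11,(650,680)), (10,(620,640)), (9,(590,610))]

def estimate_act_from_sat_total (sat_total : Int) : Int :=
  if sat_total ≤ 610 then 9
  else if 1590 ≤ sat_total then 36
  else
    -- for act in sorted(keys, reverse=True): lo, hi = dict[act]; if lo <= s <= hi: return act
    match (PySem.List.sorted actToSatRange.keys (fun k => k) true).find?
        (fun act =>
          match actToSatRange.get? act with
          | some (lo, hi) => decide (lo ≤ sat_total) && decide (sat_total ≤ hi)
          | none => false) with
    | some act => act
    | none =>
      -- return max(9, min(36, round(9 + (sat_total - 610) * (27 / 980))))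
      max 9 (min 36 (pyRoundHalfEven (8820 + (sat_total - 610) * 27) 980))

-- ===== PORT B =====
def pvBands : List (Int × Int × Int) :=
  [(590,610,9), (620,640,10), (650,680,11), (690,720,12),
   (730,770,13), (780,820,14), (830,870,15), (880,910,16),
   (920,950,17), (960,980,18), (990,1020,19), (1030,1050,20),
   (1060,1090,21), (1100,1120,22), (1130,1150,23), (1160,1190,24),
   (1200,1220,25), (1230,1250,26), (1260,1290,27), (1300,1320,28),
   (1330,1350,29), (1360,1380,30), (1390,1410,31), (1420,1440,32),
   (1450,1480,33), (1490,1530,34), (1540,1580,35), (1590,1600,36)]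

def pvLos : List Int := pvBands.map (fun b => b.1)

def estimate_act_from_sat_total_alt (sat_total : Int) : Int :=
  if sat_total ≤ 610 then 9
  else if 1590 ≤ sat_total then 36
  else
    -- _BANDS[bisect_right(_LOS, sat_total) - 1]; the index is ≥ 0 here since
    -- 610 < sat_total and the first lower bound is 590, so getD's default is unreachable
    match pvBands.getD (PySem.List.bisectRight pvLos sat_total - 1) (0, 0, 0) with
    | (_, hi, act) =>
      if sat_total ≤ hi then act
      else max 9 (min 36 (pyRoundHalfEven (8820 + (sat_total - 610) * 27) 980))

-- ===== PRECONDITION & SPEC =====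
def Spec_estimate_act_from_sat_total (sat_total : Int) (out : Int) : Prop := out = estimate_act_from_sat_total_alt sat_total
instance (sat_total : Int) (out : Int) : Decidable (Spec_estimate_act_from_sat_total sat_total out) := by unfold Spec_estimate_act_from_sat_total; infer_instance

-- ===== CLAIM (what is proved, stated in full; the proofs are below) =====
def Claim_equal_estimate_act_from_sat_total : Prop := ∀ (sat_total : Int), Dom_estimate_act_from_sat_total sat_total → Spec_estimate_act_from_sat_total sat_total (estimate_act_from_sat_total sat_total)

-- ===== LEMMAS AND PROOFS =====

-- exhaustive check of the interior region 611 ≤ s ≤ 1589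
set_option maxRecDepth 10000 in
theorem pv_mid_all :
    (List.range 979).all
      (fun k => estimate_act_from_sat_total (611 + (k : Int))
             == estimate_act_from_sat_total_alt (611 + (k : Int))) = true := by
  decide

theorem pv_mid (s : Int) (h1 : 611 ≤ s) (h2 : s ≤ 1589) :
    estimate_act_from_sat_total s = estimate_act_from_sat_total_alt s := by
  have hall := pv_mid_all
  rw [List.all_eq_true] at hall
  have hk : (s - 611).toNat ∈ List.range 979 := by
    rw [List.mem_range]; omega
  have := hall _ hk
  have hs : 611 + ((s - 611).toNat : Int) = s := by omega
  rw [hs] at this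
  exact eq_of_beq this

-- ===== VERDICT (by name: the statement is the Claim_ definition above) =====
theorem estimate_act_from_sat_total_spec : Claim_equal_estimate_act_from_sat_total := by
  intro s _
  unfold Spec_estimate_act_from_sat_total
  by_cases h1 : s ≤ 610
  · simp [estimate_act_from_sat_total, estimate_act_from_sat_total_alt, h1]
  · by_cases h2 : 1590 ≤ s
    · simp [estimate_act_from_sat_total, estimate_act_from_sat_total_alt, h1, h2]
    · exact pv_mid s (by omega) (by omega)
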